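-- pv_equiv track=rewrite | github.com/Andrew82106/PPSUCOJ_Problem_database | 【For Beginner】函数递归训练：校园乐跑/data/std.py | calculate_ways
-- ===== SOURCE A (Python) =====
-- def calculate_ways(weeks, remaining_distance, max_distance, min_distance):
--     # 如果剩余的周数为0，检查剩余的距离是否为0
--     if weeks == 0:
--         return 1 if remaining_distance <= 0 else 0
--
--     if remaining_distance <= 0 and weeks >= 0:
--         return 1
--
--     ways = 0
--     # 遍历当前周的所有可能距离
--     for distance in range(min_distance, max_distance + 1):
--         # 递归计算剩余周数的分配方式
--         ways += calculate_ways(weeks - 1, remaining_distance - distance, max_distance, min_distance)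
--
--     return ways
-- ===== SOURCE B (Python) =====
-- def calculate_ways(weeks, remaining_distance, max_distance, min_distance):
--     # Level-by-level DP: forward pass collects the reachable positive remainders
--     # per week, backward pass computes each state's count once.
--     if remaining_distance <= 0:
--         return 1
--     if weeks == 0:
--         return 0
--     levels = [{remaining_distance}]
--     for _ in range(1, weeks):
--         nxt = {r - d
--                for r in levels[-1]
--                for d in range(min_distance, max_distance + 1)
--                if r - d > 0}
--         if not nxt:
--             break
--         levels.append(nxt)
--     vals = {}
--     w = weeks - len(levels) + 1  # weeks remaining at the deepest computed level
--     for level in reversed(levels):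
--         cur = {}
--         for r in level:
--             total = 0
--             for d in range(min_distance, max_distance + 1):
--                 rr = r - d
--                 if rr <= 0:
--                     total += 1
--                 elif w > 1:
--                     total += vals[rr]
--             cur[r] = total
--         vals = cur
--         w += 1
--     return vals[remaining_distance]
-- ===== Notes on version B (the rewrite author's own statement) =====
-- stated objective: alternative
-- what changed: Replaces A's naive top-down recursion over all weekly-distance choices with an iterative level-by-level DP: a forward pass collects the reachable positive remainders per week, a backward pass computes each reachable state's count exactly once.
-- outside the precondition, e.g. on calculate_ways(-1, -5, 3, 4): A returns 0, B returns 1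
import Mathlib
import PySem

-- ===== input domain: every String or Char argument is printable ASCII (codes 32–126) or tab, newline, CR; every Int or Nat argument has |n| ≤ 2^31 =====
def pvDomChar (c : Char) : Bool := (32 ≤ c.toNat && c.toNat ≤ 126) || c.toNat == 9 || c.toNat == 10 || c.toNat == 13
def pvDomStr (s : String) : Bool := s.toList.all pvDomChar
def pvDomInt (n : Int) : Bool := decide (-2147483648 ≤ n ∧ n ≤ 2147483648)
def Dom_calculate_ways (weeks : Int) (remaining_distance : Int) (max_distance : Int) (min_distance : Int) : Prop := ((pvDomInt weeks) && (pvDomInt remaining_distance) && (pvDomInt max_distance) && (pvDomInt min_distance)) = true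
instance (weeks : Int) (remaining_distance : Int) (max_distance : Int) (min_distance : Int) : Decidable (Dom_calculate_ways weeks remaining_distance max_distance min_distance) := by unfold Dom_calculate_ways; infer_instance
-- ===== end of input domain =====

-- B replaces A's naive recursion over all weekly-distance choices by an iterative
-- level-by-level DP over the reachable states (objective: alternative).

-- ===== PORT A =====
-- A's recursion, on the number of weeks as a Nat (A only terminates for weeks ≥ 0 unless the range is empty).
def pyAaux (mx mn : Int) : Nat → Int → Int
  | 0, r => if r ≤ 0 then 1 else 0
  | (w + 1), r =>
      -- A's branch `remaining_distance <= 0 and weeks >= 0`; here weeks = w+1 ≥ 0 always holds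
      if r ≤ 0 then 1
      else (PySem.List.pyRange mn (mx + 1) 1).foldl (fun acc d => acc + pyAaux mx mn w (r - d)) 0

def calculate_ways (weeks : Int) (remaining_distance : Int) (max_distance : Int) (min_distance : Int) : Int :=
  -- totalization guard only: for weeks < 0 Python A either diverges (RecursionError) or returns 0; outside Pre_
  if weeks < 0 then 0
  else pyAaux max_distance min_distance weeks.toNat remaining_distance

-- ===== PORT B =====
-- the set comprehension {r - d for r in cur for d in range(mn, mx+1) if r - d > 0}
def bNext (mx mn : Int) (cur : PySem.Set Int) : PySem.Set Int :=
  PySem.Set.ofList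
    (cur.flatMap (fun r =>
      ((PySem.List.pyRange mn (mx + 1) 1).map (fun d => r - d)).filter (fun rr => decide (0 < rr))))

-- the forward loop `for _ in range(1, weeks): … if not nxt: break; levels.append(nxt)`:
-- the levels appended after `cur`, with k loop iterations left
def bLevels (mx mn : Int) : Nat → PySem.Set Int → List (PySem.Set Int)
  | 0, _ => []
  | k + 1, cur =>
      let nxt := bNext mx mn cur
      if nxt = [] then [] else nxt :: bLevels mx mn k nxt

-- the inner `for d in range(min_distance, max_distance+1)` accumulation of one state's total
def bRow (mx mn : Int) (w : Int) (vals : PySem.Dict Int Int) (r : Int) : Int :=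
  (PySem.List.pyRange mn (mx + 1) 1).foldl
    (fun total d =>
      if r - d ≤ 0 then total + 1
      else if 1 < w then total + vals.getD (r - d) 0
      else total) 0

-- the backward pass `for level in reversed(levels)` with its decreasing week counter:
-- head of the list is the shallowest level and gets week count w
def bBack (mx mn : Int) : Int → List (PySem.Set Int) → PySem.Dict Int Int
  | _, [] => PySem.Dict.empty
  | w, L :: rest =>
      let vals := bBack mx mn (w - 1) rest
      L.foldl (fun cur r => cur.insert r (bRow mx mn w vals r)) PySem.Dict.empty

def calculate_ways_alt (weeks : Int) (remaining_distance : Int) (max_distance : Int) (min_distance : Int) : Int :=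
  if remaining_distance ≤ 0 then 1
  else if weeks = 0 then 0
  else
    let lvl0 : PySem.Set Int := PySem.Set.ofList [remaining_distance]
    let levels := lvl0 :: bLevels max_distance min_distance (weeks - 1).toNat lvl0
    (bBack max_distance min_distance weeks levels).getD remaining_distance 0

-- ===== PRECONDITION & SPEC =====
-- Pre_ excludes negative weeks except the agreeing empty-range corner: with a nonempty weekly range A's
-- recursion never reaches a base case and raises RecursionError; with an empty range and non-positive
-- remaining distance A falls through to an accidental 0 where B naturally counts 1 (cite in claim.json).
def Pre_calculate_ways (weeks : Int) (remaining_distance : Int) (max_distance : Int) (min_distance : Int) : Prop :=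
  0 ≤ weeks ∨ (max_distance < min_distance ∧ 0 < remaining_distance)
instance (weeks : Int) (remaining_distance : Int) (max_distance : Int) (min_distance : Int) : Decidable (Pre_calculate_ways weeks remaining_distance max_distance min_distance) := by unfold Pre_calculate_ways; infer_instance

def pvWitness_calculate_ways : Int × Int × Int × Int := (3, 10, 5, 1)

def Spec_calculate_ways (weeks : Int) (remaining_distance : Int) (max_distance : Int) (min_distance : Int) (out : Int) : Prop := out = calculate_ways_alt weeks remaining_distance max_distance min_distance
instance (weeks : Int) (remaining_distance : Int) (max_distance : Int) (min_distance : Int) (out : Int) : Decidable (Spec_calculate_ways weeks remaining_distance max_distance min_distance out) := by unfold Spec_calculate_ways; infer_instance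

-- ===== CLAIM (what is proved, stated in full; the proofs are below) =====
def Claim_equal_calculate_ways : Prop := ∀ (weeks : Int) (remaining_distance : Int) (max_distance : Int) (min_distance : Int), Dom_calculate_ways weeks remaining_distance max_distance min_distance → Pre_calculate_ways weeks remaining_distance max_distance min_distance → Spec_calculate_ways weeks remaining_distance max_distance min_distance (calculate_ways weeks remaining_distance max_distance min_distance)

-- ===== LEMMAS AND PROOFS =====

lemma pyAaux_of_nonpos (mx mn : Int) (w : Nat) (r : Int) (h : r ≤ 0) :
    pyAaux mx mn w r = 1 := by
  cases w <;> simp [pyAaux, h]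

-- a dict built by inserting a key-determined value for every element of a list
lemma getD_foldl_insert_fun (f : Int → Int) :
    ∀ (L : List Int) (d0 : PySem.Dict Int Int) (x dflt : Int),
      (L.foldl (fun cur r => cur.insert r (f r)) d0).getD x dflt
        = if x ∈ L then f x else d0.getD x dflt := by
  intro L
  induction L with
  | nil => intro d0 x dflt; simp
  | cons a L ih =>
      intro d0 x dflt
      rw [List.foldl_cons, ih]
      by_cases hx : x ∈ L
      · simp [hx]
      · rw [if_neg hx, PySem.Dict.getD_insert]
        by_cases hxa : x = a
        · simp [hxa]
        · simp [hxa, hx]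

lemma mem_bNext (mx mn rr : Int) (cur : PySem.Set Int) :
    rr ∈ bNext mx mn cur
      ↔ 0 < rr ∧ ∃ r ∈ cur, ∃ d ∈ PySem.List.pyRange mn (mx + 1) 1, rr = r - d := by
  simp only [bNext, PySem.Set.mem_ofList, List.mem_flatMap, List.mem_filter, List.mem_map]
  constructor
  · rintro ⟨r, hr, ⟨⟨d, hd, rfl⟩, hpos⟩⟩
    exact ⟨by simpa using hpos, r, hr, d, hd, rfl⟩
  · rintro ⟨hpos, r, hr, d, hd, rfl⟩
    exact ⟨r, hr, ⟨⟨d, hd, rfl⟩, by simpa using hpos⟩⟩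

-- the structural facts the backward pass needs about the level list:
-- all states positive, and every positive successor of a state lies in the next level
-- (the last level has week count 1 or only non-positive successors)
def LinkChain (mx mn : Int) : Int → List (PySem.Set Int) → Prop
  | _, [] => True
  | w, L :: rest =>
      (∀ r ∈ L, 0 < r) ∧
      (match rest with
       | [] => w = 1 ∨ ∀ r ∈ L, ∀ d ∈ PySem.List.pyRange mn (mx + 1) 1, r - d ≤ 0
       | L' :: _ => ∀ r ∈ L, ∀ d ∈ PySem.List.pyRange mn (mx + 1) 1, 0 < r - d → r - d ∈ L') ∧
      LinkChain mx mn (w - 1) rest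

lemma linkChain_bLevels (mx mn : Int) :
    ∀ (k : Nat) (cur : PySem.Set Int) (w : Int),
      (∀ r ∈ cur, 0 < r) → w = (k : Int) + 1 →
      LinkChain mx mn w (cur :: bLevels mx mn k cur) := by
  intro k
  induction k with
  | zero =>
      intro cur w hpos hw
      refine ⟨hpos, ?_, trivial⟩
      simp only [bLevels]
      exact Or.inl (by omega)
  | succ k ih =>
      intro cur w hpos hw
      by_cases hn : bNext mx mn cur = []
      · refine ⟨hpos, ?_, ?_⟩
        · simp only [bLevels, if_pos hn]
          refine Or.inr (fun r hr d hd => ?_)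
          by_contra hlt
          have : r - d ∈ bNext mx mn cur :=
            (mem_bNext mx mn (r - d) cur).2 ⟨by omega, r, hr, d, hd, rfl⟩
          simp [hn] at this
        · simp only [bLevels, if_pos hn]; trivial
      · have hrec := ih (bNext mx mn cur) (w - 1)
          (fun r hr => ((mem_bNext mx mn r cur).1 hr).1) (by omega)
        refine ⟨hpos, ?_, ?_⟩
        · simp only [bLevels, if_neg hn]
          intro r hr d hd hlt
          exact (mem_bNext mx mn (r - d) cur).2 ⟨hlt, r, hr, d, hd, rfl⟩
        · simp only [bLevels, if_neg hn]
          exact hrec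

lemma foldl_congr_mem_int (f g : Int → Int → Int) :
    ∀ (l : List Int) (i : Int), (∀ d ∈ l, ∀ t, f t d = g t d) → l.foldl f i = l.foldl g i := by
  intro l
  induction l with
  | nil => intro i _; rfl
  | cons a l ih =>
      intro i h
      rw [List.foldl_cons, List.foldl_cons, h a (by simp)]
      exact ih _ (fun d hd t => h d (List.mem_cons_of_mem a hd) t)

lemma bBack_correct (mx mn : Int) :
    ∀ (ls : List (PySem.Set Int)) (w : Int), 0 < w → LinkChain mx mn w ls →
      ∀ L rest, ls = L :: rest → ∀ r ∈ L,
        (bBack mx mn w ls).getD r 0 = pyAaux mx mn w.toNat r := by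
  intro ls
  induction ls with
  | nil => intro w _ _ L rest h; simp at h
  | cons L0 rest0 ih =>
      intro w hw hchain L rest heq r hr
      injection heq with h1 h2
      subst h1
      subst h2
      obtain ⟨hpos, hlink, hchain'⟩ := hchain
      simp only [bBack]
      rw [getD_foldl_insert_fun, if_pos hr]
      obtain ⟨w', hw'⟩ : ∃ w' : Nat, w.toNat = w' + 1 := ⟨(w - 1).toNat, by omega⟩
      have hrpos : 0 < r := hpos r hr
      rw [hw']
      simp only [pyAaux, if_neg (by omega : ¬ r ≤ 0)]
      unfold bRow
      apply foldl_congr_mem_int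
      intro d hd t
      by_cases hrd : r - d ≤ 0
      · simp [hrd, pyAaux_of_nonpos mx mn w' (r - d) hrd]
      · rw [if_neg hrd]
        by_cases h1w : 1 < w
        · rw [if_pos h1w]
          cases rest0 with
          | nil =>
              rcases hlink with h1 | hnone
              · omega
              · exact absurd (hnone r hr d hd) hrd
          | cons L' rest' =>
              have hmem : r - d ∈ L' := hlink r hr d hd (by omega)
              have hval := ih (w - 1) (by omega) hchain' L' rest' rfl (r - d) hmem
              have hsub : (w - 1).toNat = w' := by omega
              rw [hsub] at hval
              rw [hval]
        · have hz : w' = 0 := by omega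
          rw [if_neg h1w, hz]
          simp [pyAaux, hrd]

-- ===== VERDICT (by name: the statement is the Claim_ definition above) =====
theorem calculate_ways_spec : Claim_equal_calculate_ways := by
  intro weeks r mx mn _ hpre
  unfold Spec_calculate_ways calculate_ways calculate_ways_alt
  by_cases hwn : (0 : Int) ≤ weeks
  · rw [if_neg (by omega : ¬ weeks < 0)]
    by_cases hr : r ≤ 0
    · rw [if_pos hr]; exact pyAaux_of_nonpos mx mn weeks.toNat r hr
    · rw [if_neg hr]
      by_cases hw0 : weeks = 0
      · subst hw0; simp [pyAaux, hr]
      · rw [if_neg hw0]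
        have hw1 : 1 ≤ weeks := by omega
        have hpos : ∀ x ∈ (PySem.Set.ofList [r] : PySem.Set Int), 0 < x := by
          intro x hx
          have : x = r := by simpa using hx
          omega
        have hchain := linkChain_bLevels mx mn (weeks - 1).toNat (PySem.Set.ofList [r]) weeks
          hpos (by omega)
        have hmem : r ∈ (PySem.Set.ofList [r] : PySem.Set Int) := by simp
        exact (bBack_correct mx mn _ weeks (by omega) hchain _ _ rfl r hmem).symm
  · -- the agreeing corner inside Pre_: weeks < 0, empty weekly range, positive remaining: both give 0
    obtain ⟨hmx, hrp⟩ : mx < mn ∧ 0 < r := by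
      rcases hpre with h | h
      · exact absurd h hwn
      · exact h
    rw [if_pos (by omega : weeks < 0), if_neg (by omega : ¬ r ≤ 0),
      if_neg (by omega : ¬ weeks = 0)]
    have ht : (weeks - 1).toNat = 0 := by omega
    rw [ht]
    simp only [bLevels, bBack]
    rw [getD_foldl_insert_fun, if_pos (by simp : r ∈ (PySem.Set.ofList [r] : PySem.Set Int))]
    unfold bRow
    rw [PySem.List.pyRange_one_eq_nil (by omega : mx + 1 ≤ mn)]
    rfl
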